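-- pv_equiv track=rewrite | github.com/agustinpodesta/Python-Course | ejercicios_python/comparaciones_ordenamiento_entregar.py | reubicar
-- ===== SOURCE A (Python) =====
-- def reubicar(lista, p):
--     """Reubica al elemento que está en la posición p de la lista
--        dentro del segmento [0:p-1].
--        Pre: p tiene que ser una posicion válida de lista."""
--     cont_2 = 0
--     v = lista[p]
--
--     # Recorrer el segmento [0:p-1] de derecha a izquierda hasta
--     # encontrar la posición j tal que lista[j-1] <= v < lista[j].
--     j = p
--     while j > 0 and v < lista[j - 1]:
--         # Desplazar los elementos hacia la derecha, dejando lugar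
--         # para insertar el elemento v donde corresponda.
--         lista[j] = lista[j - 1]
--         j -= 1
--         cont_2 +=1
--
--     lista[j] = v
--     return cont_2
-- ===== SOURCE B (Python) =====
-- def reubicar(lista, p):
--     """Reubica al elemento que está en la posición p de la lista
--        dentro del segmento [0:p-1].
--        Pre: p tiene que ser una posicion válida de lista."""
--     v = lista[p]
--     # find the insertion position j by walking the indices p-1, ..., 0
--     # downwards, keeping the lowest index whose element is still > v
--     j = p
--     for i in range(p - 1, -1, -1):
--         if lista[i] <= v:
--             break
--         j = i
--     # one bulk shift, then place v
--     lista[j + 1:p + 1] = lista[j:p]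
--     lista[j] = v
--     return p - j
-- ===== Notes on version B (the rewrite author's own statement) =====
-- stated objective: faster
-- what changed: B splits the work into a read-only downward index walk over range(p-1,-1,-1) that finds the insertion position j, followed by one bulk slice shift (C-level memmove instead of A's per-element Python-loop shifts), returning p - j.
import Mathlib
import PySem

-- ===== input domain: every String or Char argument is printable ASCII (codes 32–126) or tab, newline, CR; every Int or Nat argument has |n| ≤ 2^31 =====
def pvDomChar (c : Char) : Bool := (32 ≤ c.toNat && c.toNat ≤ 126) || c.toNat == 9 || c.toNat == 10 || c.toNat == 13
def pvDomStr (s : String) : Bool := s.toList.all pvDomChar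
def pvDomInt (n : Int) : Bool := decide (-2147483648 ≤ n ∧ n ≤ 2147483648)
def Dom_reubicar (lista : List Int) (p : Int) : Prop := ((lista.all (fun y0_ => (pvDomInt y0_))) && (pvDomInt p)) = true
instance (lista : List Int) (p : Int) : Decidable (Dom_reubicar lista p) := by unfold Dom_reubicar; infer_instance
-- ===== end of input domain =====

-- B separates the downward position search (a read-only for-loop over range(p-1,-1,-1) with
-- break) from the data movement (one bulk slice shift) and returns p - j, where A searches and
-- shifts together in one counting while-loop.  Equivalence is about the RETURN value; both
-- Pythons perform the same in-place mutation of `lista`.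

-- ===== PORT A =====
-- A's while loop: shifts lista[j-1] to lista[j], decrements j, counts; carries the mutated list.
def reubicarLoopA (v : Int) (lst : List Int) (j cont : Int) : Int :=
  if h : j > 0 ∧ v < lst.getD (j - 1).toNat 0 then
    reubicarLoopA v (lst.set j.toNat (lst.getD (j - 1).toNat 0)) (j - 1) (cont + 1)
  else cont
termination_by j.toNat
decreasing_by omega

def reubicar (lista : List Int) (p : Int) : Int :=
  match PySem.List.pyGet? lista p with
  | none => 0          -- IndexError; excluded by Pre_reubicar
  | some v => reubicarLoopA v lista p 0

-- ===== PORT B =====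
-- B's for-loop over range(p-1,-1,-1) with break: recursion over the (already materialised)
-- index list, `j` is the loop-carried candidate position.  Inside Pre_ every index read is in
-- range, so pyGetD is exact for lista[i].
def reubicarForB (v : Int) (lista : List Int) : Int → List Int → Int
  | j, [] => j
  | j, i :: rest =>
      if PySem.List.pyGetD lista i 0 ≤ v then j
      else reubicarForB v lista i rest

def reubicar_alt (lista : List Int) (p : Int) : Int :=
  match PySem.List.pyGet? lista p with
  | none => 0          -- IndexError; excluded by Pre_reubicar
  | some v => p - reubicarForB v lista p (PySem.List.pyRange (p - 1) (-1) (-1))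

-- ===== PRECONDITION & SPEC =====
-- Pre_: p must be a valid (possibly negative) index of lista; outside it Python raises IndexError.
def Pre_reubicar (lista : List Int) (p : Int) : Prop :=
  -(lista.length : Int) ≤ p ∧ p < lista.length
instance (lista : List Int) (p : Int) : Decidable (Pre_reubicar lista p) := by
  unfold Pre_reubicar; infer_instance

def pvWitness_reubicar : List Int × Int := ([3, 1, 2], 2)

def Spec_reubicar (lista : List Int) (p : Int) (out : Int) : Prop := out = reubicar_alt lista p
instance (lista : List Int) (p : Int) (out : Int) : Decidable (Spec_reubicar lista p out) := by unfold Spec_reubicar; infer_instance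

-- ===== CLAIM (what is proved, stated in full; the proofs are below) =====
def Claim_equal_reubicar : Prop := ∀ (lista : List Int) (p : Int), Dom_reubicar lista p → Pre_reubicar lista p → Spec_reubicar lista p (reubicar lista p)

-- ===== LEMMAS AND PROOFS =====

-- Proof-only intermediate form: the pure downward scan both loops compute.
def pvScan (v : Int) (lista : List Int) (j : Int) : Int :=
  if h : j > 0 ∧ v < lista.getD (j - 1).toNat 0 then pvScan v lista (j - 1)
  else j
termination_by j.toNat
decreasing_by omega

-- A's writes land at indices ≥ its reads, so A's loop on any list agreeing with `lista`
-- below j computes cont + (j - pvScan j).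
lemma loopA_eq_scan (v : Int) (lista : List Int) :
    ∀ (n : Nat) (j : Int), j.toNat = n →
      ∀ (lst : List Int) (cont : Int),
        (∀ i : Nat, (i : Int) < j → lst.getD i 0 = lista.getD i 0) →
        reubicarLoopA v lst j cont = cont + (j - pvScan v lista j) := by
  intro n
  induction n using Nat.strong_induction_on with
  | _ n ih =>
    intro j hj lst cont hag
    rw [reubicarLoopA, pvScan]
    by_cases hc : j > 0 ∧ v < lista.getD (j - 1).toNat 0
    · have hread : lst.getD (j - 1).toNat 0 = lista.getD (j - 1).toNat 0 := by
        apply hag; omega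
      rw [dif_pos (by rw [hread]; exact hc), dif_pos hc]
      have hlt : (j - 1).toNat < n := by omega
      have hag' : ∀ i : Nat, (i : Int) < j - 1 →
          (lst.set j.toNat (lista.getD (j - 1).toNat 0)).getD i 0 = lista.getD i 0 := by
        intro i hi
        have hne : j.toNat ≠ i := by omega
        rw [List.getD, List.getElem?_set_ne hne, ← List.getD]
        exact hag i (by omega)
      rw [hread, ih (j - 1).toNat hlt (j - 1) rfl _ (cont + 1) hag']
      ring
    · have hc' : ¬ (j > 0 ∧ v < lst.getD (j - 1).toNat 0) := by
        by_cases hj0 : j > 0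
        · have := hag (j - 1).toNat (by omega)
          rw [this]; exact hc
        · intro h; exact hj0 h.1
      rw [dif_neg hc', dif_neg hc]; ring

-- B's for-loop over range(j-1,-1,-1) computes the same scan position.
lemma forB_eq_scan (v : Int) (lista : List Int) :
    ∀ (n : Nat) (j : Int), j.toNat = n →
      reubicarForB v lista j (PySem.List.pyRange (j - 1) (-1) (-1)) = pvScan v lista j := by
  intro n
  induction n using Nat.strong_induction_on with
  | _ n ih =>
    intro j hj
    rw [pvScan]
    by_cases hj0 : 0 < j
    · rw [PySem.List.pyRange_neg_one_cons (by omega : (-1 : Int) < j - 1)]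
      by_cases hc : v < lista.getD (j - 1).toNat 0
      · rw [dif_pos ⟨hj0, hc⟩, reubicarForB]
        have hget : PySem.List.pyGetD lista (j - 1) 0 = lista.getD (j - 1).toNat 0 := by
          have : ((j - 1).toNat : Int) = j - 1 := by omega
          rw [← this, PySem.List.pyGetD_natCast]; simp
        rw [if_neg (by rw [hget]; omega)]
        have : j - 1 - 1 = (j - 1) - 1 := by ring
        rw [this]
        exact ih (j - 1).toNat (by omega) (j - 1) rfl
      · rw [dif_neg (by intro h; exact hc h.2), reubicarForB]
        have hget : PySem.List.pyGetD lista (j - 1) 0 = lista.getD (j - 1).toNat 0 := by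
          have : ((j - 1).toNat : Int) = j - 1 := by omega
          rw [← this, PySem.List.pyGetD_natCast]; simp
        rw [if_pos (by rw [hget]; omega)]
    · rw [dif_neg (by intro h; exact hj0 h.1),
        PySem.List.pyRange_neg_one_eq_nil (by omega : j - 1 ≤ -1), reubicarForB]

-- ===== VERDICT (by name: the statement is the Claim_ definition above) =====
theorem reubicar_spec : Claim_equal_reubicar := by
  intro lista p _ _
  unfold Spec_reubicar reubicar reubicar_alt
  cases h : PySem.List.pyGet? lista p with
  | none => rfl
  | some v =>
    show reubicarLoopA v lista p 0 = p - reubicarForB v lista p (PySem.List.pyRange (p - 1) (-1) (-1))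
    rw [loopA_eq_scan v lista p.toNat p rfl lista 0 (fun _ _ => rfl),
      forB_eq_scan v lista p.toNat p rfl]
    ring
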